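-- pv_equiv track=rewrite | github.com/sunflower-works/ideal-couscous | scripts/mosaic_mark.py | choose_grid
-- ===== SOURCE A (Python) =====
-- def choose_grid(pages: int) -> tuple[int, int]:
--     best = (0, 0, 10**9, 10**9)
--     limit = min(pages, 200)
--     for r in range(1, limit + 1):
--         c = (pages + r - 1) // r
--         slots = c * r
--         waste = slots - pages
--         aspect = abs(c - r)
--         if (waste < best[2]) or (waste == best[2] and aspect < best[3]):
--             best = (c, r, waste, aspect)
--             if waste == 0 and aspect <= 1:
--                 break
--     return best[0], best[1]
-- ===== SOURCE B (Python) =====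
-- def choose_grid(pages: int) -> tuple[int, int]:
--     if pages <= 0:
--         return (0, 0)
--     limit = min(pages, 200)
--     divisors = [r for r in range(1, limit + 1) if pages % r == 0]
--     r = min(divisors, key=lambda d: abs(pages // d - d))
--     return (pages // r, r)
-- ===== Notes on version B (the rewrite author's own statement) =====
-- stated objective: simpler
-- what changed: B drops the best-tuple bookkeeping (waste/slots/early break) entirely: a single-row grid always has zero waste, so only divisors of pages can win, and B filters the divisors of pages up to the min(pages,200) cap and takes the first min by aspect |pages//r - r|.
import Mathlib
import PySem

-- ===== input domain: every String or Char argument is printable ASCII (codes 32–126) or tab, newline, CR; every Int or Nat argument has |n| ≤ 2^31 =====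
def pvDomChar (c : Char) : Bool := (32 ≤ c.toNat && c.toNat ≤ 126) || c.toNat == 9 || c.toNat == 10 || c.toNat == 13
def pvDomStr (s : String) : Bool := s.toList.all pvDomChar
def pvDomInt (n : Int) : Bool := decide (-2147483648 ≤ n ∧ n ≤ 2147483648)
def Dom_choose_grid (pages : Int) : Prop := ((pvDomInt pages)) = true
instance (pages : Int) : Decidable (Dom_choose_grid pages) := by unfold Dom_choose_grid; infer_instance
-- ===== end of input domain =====

-- B replaces A's best-tuple loop (waste/slots/aspect bookkeeping + early break) by
-- "filter the divisors of pages up to the cap, take the first min by aspect": simpler, same cost.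

-- ===== PORT A =====
-- the loop body of A; the Bool is the break flag (true = loop exited)
def cgStep (pages : Int) (st : (Int × Int × Int × Int) × Bool) (r : Int) :
    (Int × Int × Int × Int) × Bool :=
  if st.2 then st
  else
    let best := st.1
    let c := PySem.Int.floordiv (pages + r - 1) r
    let slots := c * r
    let waste := slots - pages
    let aspect := |c - r|
    if waste < best.2.2.1 ∨ (waste = best.2.2.1 ∧ aspect < best.2.2.2) then
      ((c, r, waste, aspect), decide (waste = 0 ∧ aspect ≤ 1))
    else st

def choose_grid (pages : Int) : Int × Int :=
  let limit := min pages 200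
  let res := (PySem.List.pyRange 1 (limit + 1) 1).foldl (cgStep pages) ((0, 0, 10 ^ 9, 10 ^ 9), false)
  (res.1.1, res.1.2.1)

-- ===== PORT B =====
def choose_grid_alt (pages : Int) : Int × Int :=
  if pages ≤ 0 then (0, 0)
  else
    let limit := min pages 200
    let divisors := (PySem.List.pyRange 1 (limit + 1) 1).filter (fun r => PySem.Int.mod pages r == 0)
    match PySem.List.min? divisors (fun d => |PySem.Int.floordiv pages d - d|) with
    | some r => (PySem.Int.floordiv pages r, r)
    | none => (0, 0)   -- unreachable for positive pages (a one-row grid is always a divisor candidate); totality only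

-- ===== PRECONDITION & SPEC =====
def Spec_choose_grid (pages : Int) (out : Int × Int) : Prop := out = choose_grid_alt pages
instance (pages : Int) (out : Int × Int) : Decidable (Spec_choose_grid pages out) := by unfold Spec_choose_grid; infer_instance

-- ===== CLAIM (what is proved, stated in full; the proofs are below) =====
def Claim_equal_choose_grid : Prop := ∀ (pages : Int), Dom_choose_grid pages → Spec_choose_grid pages (choose_grid pages)

-- ===== LEMMAS AND PROOFS =====

-- the key B minimizes: aspect of a divisor
def cgKey (p d : Int) : Int := |PySem.Int.floordiv p d - d|

-- the common "first argmin over the divisors seen so far" fold both sides reduce to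
def cgBest (p : Int) (l : List Int) (r0 : Int) : Int :=
  l.foldl (fun acc r =>
    if PySem.Int.mod p r == 0 then (if cgKey p r < cgKey p acc then r else acc) else acc) r0

-- A's loop state when the current best is the divisor r0
def cgSt (p r0 : Int) : (Int × Int × Int × Int) × Bool :=
  ((PySem.Int.floordiv p r0, r0, 0, cgKey p r0), decide (cgKey p r0 ≤ 1))

lemma cg_ceil_dvd (p r : Int) (hr : 1 ≤ r) (hd : r ∣ p) :
    PySem.Int.floordiv (p + r - 1) r = PySem.Int.floordiv p r ∧
      PySem.Int.floordiv p r * r = p := by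
  obtain ⟨q, hq⟩ := hd
  have h1 : PySem.Int.floordiv p r = q := by
    rw [PySem.Int.floordiv_eq_iff_of_pos (by omega)]
    constructor <;> nlinarith
  have h2 : PySem.Int.floordiv (p + r - 1) r = q := by
    rw [PySem.Int.floordiv_eq_iff_of_pos (by omega)]
    constructor <;> nlinarith
  refine ⟨by rw [h1, h2], by rw [h1, mul_comm]; omega⟩

lemma cg_ceil_not_dvd (p r : Int) (hr : 1 ≤ r) (hnd : ¬ r ∣ p) :
    0 < PySem.Int.floordiv (p + r - 1) r * r - p := by
  have hq := Int.emod_add_ediv p r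
  have hb1 : 0 ≤ p % r := Int.emod_nonneg p (by omega)
  have hb2 : p % r < r := Int.emod_lt_of_pos p (by omega)
  have ht0 : p % r ≠ 0 := fun h => hnd (Int.dvd_of_emod_eq_zero h)
  have ht1 : 1 ≤ p % r := by omega
  have h2 : PySem.Int.floordiv (p + r - 1) r = p / r + 1 := by
    rw [PySem.Int.floordiv_eq_iff_of_pos (by omega)]
    constructor <;> nlinarith
  rw [h2]; nlinarith

-- once the best divisor has aspect ≤ 1, no divisor beats it (p = r0(r0±1) is never a square)
lemma cg_key_min (p r0 r : Int) (hp : 1 ≤ p) (hr0 : 1 ≤ r0) (hd0 : r0 ∣ p)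
    (hr : 1 ≤ r) (hd : r ∣ p) (hle : cgKey p r0 ≤ 1) : ¬ cgKey p r < cgKey p r0 := by
  intro hlt
  have e0 := (cg_ceil_dvd p r0 hr0 hd0).2
  have e1 := (cg_ceil_dvd p r hr hd).2
  unfold cgKey at hle hlt
  have h0 := abs_nonneg (PySem.Int.floordiv p r - r)
  set q0 := PySem.Int.floordiv p r0 with hq0
  set q := PySem.Int.floordiv p r with hq
  have hz : |q - r| = 0 := by omega
  have hqr : q = r := by have := abs_eq_zero.mp hz; omega
  have hk0 : |q0 - r0| = 1 := by omega
  have hcases : q0 - r0 = 1 ∨ q0 - r0 = -1 := by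
    rcases (abs_eq (by norm_num : (0:ℤ) ≤ 1)).mp hk0 with h | h <;> omega
  -- p = r * r and p = q0 * r0 with q0 = r0 ± 1: impossible for integers
  rcases hcases with h | h
  · by_cases hle' : r ≤ r0
    · nlinarith [mul_le_mul_of_nonneg_left hle' (by omega : (0:ℤ) ≤ r)]
    · have hge : r0 + 1 ≤ r := by omega
      nlinarith [mul_le_mul_of_nonneg_left hge (by omega : (0:ℤ) ≤ r0 + 1)]
  · have hr02 : 2 ≤ r0 := by nlinarith
    by_cases hle' : r0 ≤ r
    · nlinarith [mul_le_mul_of_nonneg_left hle' (by omega : (0:ℤ) ≤ r0)]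
    · have hlt2 : r ≤ r0 - 1 := by omega
      nlinarith [mul_le_mul_of_nonneg_left hlt2 (by omega : (0:ℤ) ≤ r)]

-- A's loop body, started at a divisor state, performs exactly the argmin update
lemma cg_step_eq (p r0 r : Int) (hp : 1 ≤ p) (h1 : 1 ≤ r0) (h2 : r0 ∣ p) (hr : 1 ≤ r) :
    cgStep p (cgSt p r0) r =
      cgSt p (if PySem.Int.mod p r == 0 then (if cgKey p r < cgKey p r0 then r else r0) else r0) := by
  by_cases hdone : cgKey p r0 ≤ 1
  · -- break already taken: A's state is frozen, and indeed no divisor can still improve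
    have hflag : (cgSt p r0).2 = true := by simp [cgSt, hdone]
    rw [cgStep, if_pos hflag]
    by_cases hdv : PySem.Int.mod p r == 0
    · have hdvd : r ∣ p := (PySem.Int.mod_eq_zero_iff_dvd p r).mp (by simpa using hdv)
      have := cg_key_min p r0 r hp h1 h2 hr hdvd hdone
      simp [hdv, this]
    · simp [hdv]
  · have hflag : ¬ (cgSt p r0).2 = true := by simp [cgSt, hdone]
    by_cases hdv : PySem.Int.mod p r == 0
    · have hdvd : r ∣ p := (PySem.Int.mod_eq_zero_iff_dvd p r).mp (by simpa using hdv)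
      obtain ⟨hc, hmul⟩ := cg_ceil_dvd p r hr hdvd
      by_cases hk : cgKey p r < cgKey p r0
      · have hR : (if PySem.Int.mod p r == 0 then (if cgKey p r < cgKey p r0 then r else r0) else r0) = r := by
          simp [hdv, hk]
        rw [hR, cgStep, if_neg hflag]
        unfold cgKey at hk
        simp [cgSt, cgKey, hc, hmul, hk]
      · have hR : (if PySem.Int.mod p r == 0 then (if cgKey p r < cgKey p r0 then r else r0) else r0) = r0 := by
          simp [hdv, hk]
        rw [hR, cgStep, if_neg hflag]
        unfold cgKey at hk
        simp [cgSt, cgKey, hc, hmul, hk]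
    · have hndvd : ¬ r ∣ p := by
        intro hd'
        have hmz : PySem.Int.mod p r = 0 := (PySem.Int.mod_eq_zero_iff_dvd p r).mpr hd'
        simp [hmz] at hdv
      have hpos := cg_ceil_not_dvd p r hr hndvd
      have hR : (if PySem.Int.mod p r == 0 then (if cgKey p r < cgKey p r0 then r else r0) else r0) = r0 := by
        simp [hdv]
      rw [hR, cgStep, if_neg hflag]
      have hcond : ¬ (PySem.Int.floordiv (p + r - 1) r * r - p < ((PySem.Int.floordiv p r0, r0, (0:ℤ), cgKey p r0) : Int × Int × Int × Int).2.2.1 ∨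
          (PySem.Int.floordiv (p + r - 1) r * r - p = ((PySem.Int.floordiv p r0, r0, (0:ℤ), cgKey p r0) : Int × Int × Int × Int).2.2.1 ∧
            |PySem.Int.floordiv (p + r - 1) r - r| < ((PySem.Int.floordiv p r0, r0, (0:ℤ), cgKey p r0) : Int × Int × Int × Int).2.2.2)) := by
        simp only []
        push_neg
        exact ⟨by omega, fun h => absurd h (by omega)⟩
      simp only [cgSt] at hcond ⊢
      rw [if_neg hcond]

lemma cg_foldA (p : Int) (hp : 1 ≤ p) :
    ∀ (l : List Int) (r0 : Int), (∀ r ∈ l, 1 ≤ r) → 1 ≤ r0 → r0 ∣ p →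
      l.foldl (cgStep p) (cgSt p r0) = cgSt p (cgBest p l r0) := by
  intro l
  induction l with
  | nil => intro r0 _ _ _; simp [cgBest]
  | cons r t ih =>
    intro r0 hl h1 h2
    have hr : 1 ≤ r := hl r (by simp)
    have ht : ∀ x ∈ t, 1 ≤ x := fun x hx => hl x (by simp [hx])
    rw [List.foldl_cons, cg_step_eq p r0 r hp h1 h2 hr]
    simp only [cgBest, List.foldl_cons]
    by_cases hdv : PySem.Int.mod p r == 0
    · have hdvd : r ∣ p := (PySem.Int.mod_eq_zero_iff_dvd p r).mp (by simpa using hdv)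
      simp only [hdv, if_true]
      by_cases hk : cgKey p r < cgKey p r0
      · simp only [hk, if_true]; exact ih r ht hr hdvd
      · simp only [hk, if_false]; exact ih r0 ht h1 h2
    · simp only [hdv]; exact ih r0 ht h1 h2

lemma cg_first_step (p : Int) :
    cgStep p ((0, 0, 10 ^ 9, 10 ^ 9), false) 1 = cgSt p 1 := by
  have h1 : PySem.Int.floordiv (p + 1 - 1) 1 = p := by
    rw [PySem.Int.floordiv_eq_iff_of_pos (by omega)]; omega
  rw [cgStep]
  simp only [if_neg (by simp : ¬ ((((0:ℤ), (0:ℤ), (10:ℤ) ^ 9, (10:ℤ) ^ 9), false)).2 = true)]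
  simp only [h1]
  rw [if_pos]
  · simp [cgSt, cgKey]
  · left; norm_num

-- B's min? over the r0-headed divisor list is the same argmin fold
lemma cg_minB (p : Int) : ∀ (l : List Int) (r0 : Int),
    PySem.List.min? (r0 :: l.filter (fun r => PySem.Int.mod p r == 0))
      (fun d => |PySem.Int.floordiv p d - d|) = some (cgBest p l r0) := by
  intro l
  induction l with
  | nil => intro r0; simp [cgBest, PySem.List.min?]
  | cons r tl ih =>
    intro r0
    simp only [List.filter_cons]
    by_cases hdv : PySem.Int.mod p r == 0
    · simp only [hdv, if_true]
      have hstep : PySem.List.min? (r0 :: r :: tl.filter (fun x => PySem.Int.mod p x == 0))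
          (fun d => |PySem.Int.floordiv p d - d|) =
          PySem.List.min? ((if cgKey p r < cgKey p r0 then r else r0) ::
            tl.filter (fun x => PySem.Int.mod p x == 0))
          (fun d => |PySem.Int.floordiv p d - d|) := by
        simp only [PySem.List.min?, List.foldl_cons]
        congr 1
        unfold cgKey
        by_cases hk : |PySem.Int.floordiv p r - r| < |PySem.Int.floordiv p r0 - r0| <;> simp [hk]
      rw [hstep, ih]
      simp only [cgBest, List.foldl_cons, hdv, if_true]
    · rw [if_neg hdv, ih]
      simp only [cgBest, List.foldl_cons]
      rw [if_neg hdv]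

-- ===== VERDICT (by name: the statement is the Claim_ definition above) =====
theorem choose_grid_spec : Claim_equal_choose_grid := by
  intro p _
  unfold Spec_choose_grid choose_grid choose_grid_alt
  by_cases hp : p ≤ 0
  · have hr : PySem.List.pyRange 1 (min p 200 + 1) 1 = [] :=
      PySem.List.pyRange_one_eq_nil (by omega)
    simp [hr, hp]
  · push_neg at hp
    have hp1 : 1 ≤ p := hp
    have hlim : 1 ≤ min p 200 := by omega
    rw [if_neg (by omega)]
    have hsplit : PySem.List.pyRange 1 (min p 200 + 1) 1 =
        1 :: PySem.List.pyRange 2 (min p 200 + 1) 1 := by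
      have := PySem.List.pyRange_one_cons (a := 1) (b := min p 200 + 1) (by omega)
      simpa using this
    set t := PySem.List.pyRange 2 (min p 200 + 1) 1 with htdef
    have ht : ∀ r ∈ t, 1 ≤ r := by
      intro r hr
      have := (PySem.List.mem_pyRange_one).mp hr
      omega
    -- A side: the loop is the argmin fold
    have hA : (PySem.List.pyRange 1 (min p 200 + 1) 1).foldl (cgStep p)
        ((0, 0, 10 ^ 9, 10 ^ 9), false) = cgSt p (cgBest p t 1) := by
      rw [hsplit, List.foldl_cons, cg_first_step p]
      exact cg_foldA p hp1 t 1 ht (by omega) (one_dvd p)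
    -- B side: min? over the divisor filter is the same argmin fold
    have hq1 : (PySem.Int.mod p 1 == 0) = true := by simp
    have hfil : (PySem.List.pyRange 1 (min p 200 + 1) 1).filter
        (fun r => PySem.Int.mod p r == 0) =
        1 :: t.filter (fun r => PySem.Int.mod p r == 0) := by
      rw [hsplit, List.filter_cons, if_pos hq1]
    have hB : PySem.List.min? ((PySem.List.pyRange 1 (min p 200 + 1) 1).filter
        (fun r => PySem.Int.mod p r == 0)) (fun d => |PySem.Int.floordiv p d - d|) =
        some (cgBest p t 1) := by
      rw [hfil]
      exact cg_minB p t 1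
    rw [show ((10:ℤ) ^ 9) = 1000000000 by norm_num] at hA
    simp [hA, hB, cgSt]
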